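-- pv_equiv track=rewrite | github.com/EmericFo/facilitateurIsograd | exo3/exo3.py | goOnCol
-- ===== SOURCE A (Python) =====
-- def goOnCol(fromPos, toPos, cToRet):
--     toC = toPos[0]
--     if fromPos[0] < toC:
--         fromPos[0] += 1
--         cToRet.append("v")
--         return goOnCol(fromPos, toPos, cToRet)
--     elif fromPos[0] > toC:
--         fromPos[0] -= 1
--         cToRet.append("^")
--         return goOnCol(fromPos, toPos, cToRet)
--     return cToRet
-- ===== SOURCE B (Python) =====
-- def goOnCol(fromPos, toPos, cToRet):
--     d = toPos[0] - fromPos[0]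
--     cToRet.extend(["v"] * d if d > 0 else ["^"] * (-d))
--     fromPos[0] = toPos[0]
--     return cToRet
-- ===== Notes on version B (the rewrite author's own statement) =====
-- stated objective: simpler
-- what changed: Replaces A's one-step-per-call recursion with a single closed-form list multiplication (abs(toPos[0]-fromPos[0]) copies of 'v' or '^' appended at once), eliminating recursion entirely.
import Mathlib
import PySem

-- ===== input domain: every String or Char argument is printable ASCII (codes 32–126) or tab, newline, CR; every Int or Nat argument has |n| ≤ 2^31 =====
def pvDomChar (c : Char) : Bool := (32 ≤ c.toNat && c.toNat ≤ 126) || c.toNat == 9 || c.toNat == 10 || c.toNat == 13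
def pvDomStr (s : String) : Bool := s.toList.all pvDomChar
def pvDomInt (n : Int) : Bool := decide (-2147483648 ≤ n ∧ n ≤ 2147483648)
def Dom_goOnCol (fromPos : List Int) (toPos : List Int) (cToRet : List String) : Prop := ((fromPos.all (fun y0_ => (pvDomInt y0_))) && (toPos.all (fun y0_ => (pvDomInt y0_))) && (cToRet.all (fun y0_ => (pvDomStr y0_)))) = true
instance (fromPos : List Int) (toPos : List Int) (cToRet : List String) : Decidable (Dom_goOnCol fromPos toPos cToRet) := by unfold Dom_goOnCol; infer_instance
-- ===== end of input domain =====

-- B replaces A's one-step-per-call recursion with a closed-form list multiplication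
-- (equivalence is about the return value; A and B perform the same in-place mutations of fromPos/cToRet in Python).
-- ===== PORT A =====
-- A's recursion only ever reads/writes index 0 of fromPos and reads toPos[0];
-- the helper carries exactly those two ints and the accumulating list, one unit per call.
def goOnColA (f toC : Int) (acc : List String) : List String :=
  if f < toC then goOnColA (f + 1) toC (acc ++ ["v"])
  else if toC < f then goOnColA (f - 1) toC (acc ++ ["^"])
  else acc
termination_by (toC - f).natAbs
decreasing_by all_goals omega

def goOnCol (fromPos : List Int) (toPos : List Int) (cToRet : List String) : List String :=
  match PySem.List.pyGet? toPos 0, PySem.List.pyGet? fromPos 0 with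
  | some toC, some f => goOnColA f toC cToRet
  | _, _ => []   -- IndexError in Python; excluded by Pre_goOnCol

-- ===== PORT B =====
def goOnCol_alt (fromPos : List Int) (toPos : List Int) (cToRet : List String) : List String :=
  ((PySem.List.pyGet? toPos 0).bind fun toC =>
   (PySem.List.pyGet? fromPos 0).map fun f =>
      let d := toC - f
      cToRet ++ (if d > 0 then List.replicate d.toNat "v" else List.replicate (-d).toNat "^")).getD []   -- none = IndexError in Python

-- ===== PRECONDITION & SPEC =====
-- Pre_ excludes empty fromPos/toPos (A raises IndexError) and offsets larger than 900,
-- at/near which A exhausts CPython's default recursion limit (RecursionError around 997).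
def Pre_goOnCol (fromPos : List Int) (toPos : List Int) (cToRet : List String) : Prop :=
  fromPos ≠ [] ∧ toPos ≠ [] ∧ (toPos.headI - fromPos.headI).natAbs ≤ 900
instance (fromPos : List Int) (toPos : List Int) (cToRet : List String) : Decidable (Pre_goOnCol fromPos toPos cToRet) := by unfold Pre_goOnCol; infer_instance
def pvWitness_goOnCol : List Int × List Int × List String := ([2], [5], ["^"])

def Spec_goOnCol (fromPos : List Int) (toPos : List Int) (cToRet : List String) (out : List String) : Prop := out = goOnCol_alt fromPos toPos cToRet
instance (fromPos : List Int) (toPos : List Int) (cToRet : List String) (out : List String) : Decidable (Spec_goOnCol fromPos toPos cToRet out) := by unfold Spec_goOnCol; infer_instance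

-- ===== CLAIM (what is proved, stated in full; the proofs are below) =====
def Claim_equal_goOnCol : Prop := ∀ (fromPos : List Int) (toPos : List Int) (cToRet : List String), Dom_goOnCol fromPos toPos cToRet → Pre_goOnCol fromPos toPos cToRet → Spec_goOnCol fromPos toPos cToRet (goOnCol fromPos toPos cToRet)

-- ===== LEMMAS AND PROOFS =====

-- ===== VERDICT (by name: the statement is the Claim_ definition above) =====
lemma goOnColA_closed (n : Nat) : ∀ (f toC : Int) (acc : List String), (toC - f).natAbs = n →
    goOnColA f toC acc =
      acc ++ (if toC - f > 0 then List.replicate (toC - f).toNat "v" else List.replicate (f - toC).toNat "^") := by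
  induction n with
  | zero =>
    intro f toC acc h
    have : toC = f := by omega
    subst this
    rw [goOnColA]
    simp
  | succ k ih =>
    intro f toC acc h
    rw [goOnColA]
    by_cases h1 : f < toC
    · rw [if_pos h1, ih (f + 1) toC (acc ++ ["v"]) (by omega)]
      have hpos : toC - f > 0 := by omega
      have hnat : (toC - f).toNat = (toC - (f + 1)).toNat + 1 := by omega
      rw [if_pos hpos, List.append_assoc]
      by_cases h2 : toC - (f + 1) > 0
      · rw [if_pos h2]
        congr 1
        rw [hnat, List.replicate_succ]
        rfl
      · rw [if_neg h2]
        have h0 : f + 1 - toC = 0 := by omega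
        have h1' : (toC - f).toNat = 1 := by omega
        simp [h0, h1']
    · have h1' : toC < f := by omega
      rw [if_neg h1, if_pos h1', ih (f - 1) toC (acc ++ ["^"]) (by omega)]
      have hneg : ¬ toC - f > 0 := by omega
      have hneg2 : ¬ toC - (f - 1) > 0 := by omega
      have hnat : (f - toC).toNat = (f - 1 - toC).toNat + 1 := by omega
      rw [if_neg hneg, if_neg hneg2, List.append_assoc]
      congr 1
      rw [hnat, List.replicate_succ]
      rfl

theorem goOnCol_spec : Claim_equal_goOnCol := by
  intro fromPos toPos cToRet _ hpre
  obtain ⟨hf0, ht0, -⟩ := hpre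
  obtain ⟨f, fs, rfl⟩ := List.exists_cons_of_ne_nil hf0
  obtain ⟨toC, ts, rfl⟩ := List.exists_cons_of_ne_nil ht0
  unfold Spec_goOnCol goOnCol goOnCol_alt
  have ht : PySem.List.pyGet? (toC :: ts) 0 = some toC := by
    simp [PySem.List.pyGet?, PySem.List.pyIdx?]
  have hf : PySem.List.pyGet? (f :: fs) 0 = some f := by
    simp [PySem.List.pyGet?, PySem.List.pyIdx?]
  rw [ht, hf]
  dsimp only [Option.bind, Option.map, Option.getD]
  rw [goOnColA_closed (toC - f).natAbs f toC cToRet rfl]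
  have hn : -(toC - f) = f - toC := by ring
  simp [hn]
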